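-- pv_equiv track=rewrite | github.com/GinoLongobucco/SaaSGenius | models/web_search_rag.py | _filter_relevant_results
-- ===== SOURCE A (Python) =====
-- from typing import List, Dict, Any, Optional
--
-- def _filter_relevant_results(results: List[Dict], query: str) -> List[Dict]:
--     """Filtra y rankea resultados por relevancia al query"""
--     if not results:
--         return []
--
--     query_keywords = set(query.lower().split())
--     scored_results = []
--
--     for result in results:
--         title = result.get('title', '').lower()
--         snippet = result.get('snippet', '').lower()
--
--         # Calcular score de relevancia
--         title_matches = sum(1 for keyword in query_keywords if keyword in title)
--         snippet_matches = sum(1 for keyword in query_keywords if keyword in snippet)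
--
--         # Bonus por palabras clave importantes
--         bonus_keywords = ['market', 'analysis', 'startup', 'saas', 'business', 'competitor']
--         bonus_score = sum(1 for keyword in bonus_keywords if keyword in title or keyword in snippet)
--
--         relevance_score = (title_matches * 2) + snippet_matches + bonus_score
--
--         if relevance_score > 0:
--             scored_results.append((relevance_score, result))
--
--     # Ordenar por score y devolver solo los resultados
--     scored_results.sort(key=lambda x: x[0], reverse=True)
--     return [result for score, result in scored_results]
-- ===== SOURCE B (Python) =====
-- def _filter_relevant_results(results, query):
--     """Same ranking, emitted by a bucket countdown from the top score instead of a comparison sort."""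
--     keywords = set(query.lower().split())
--     bonus = ['market', 'analysis', 'startup', 'saas', 'business', 'competitor']
--
--     def score(result):
--         title = result.get('title', '').lower()
--         snippet = result.get('snippet', '').lower()
--         return (2 * len([k for k in keywords if k in title])
--                 + len([k for k in keywords if k in snippet])
--                 + len([k for k in bonus if k in title or k in snippet]))
--
--     scored = [(score(r), r) for r in results]
--     top = max((s for s, _ in scored), default=0)
--
--     out = []
--     s = top
--     while s > 0:
--         out += [r for sc, r in scored if sc == s]
--         s -= 1
--     return out
-- ===== Notes on version B (the rewrite author's own statement) =====
-- stated objective: alternative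
-- what changed: B scores every result once via filtered-list lengths (keeping zero-score entries), takes the maximum score with max(), and emits the output by a while-loop countdown from the top score, appending the bucket of results with exactly that score at each step; this reproduces A's stable descending sort-and-filter without building a filtered tuple list or calling sort.
import Mathlib
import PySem

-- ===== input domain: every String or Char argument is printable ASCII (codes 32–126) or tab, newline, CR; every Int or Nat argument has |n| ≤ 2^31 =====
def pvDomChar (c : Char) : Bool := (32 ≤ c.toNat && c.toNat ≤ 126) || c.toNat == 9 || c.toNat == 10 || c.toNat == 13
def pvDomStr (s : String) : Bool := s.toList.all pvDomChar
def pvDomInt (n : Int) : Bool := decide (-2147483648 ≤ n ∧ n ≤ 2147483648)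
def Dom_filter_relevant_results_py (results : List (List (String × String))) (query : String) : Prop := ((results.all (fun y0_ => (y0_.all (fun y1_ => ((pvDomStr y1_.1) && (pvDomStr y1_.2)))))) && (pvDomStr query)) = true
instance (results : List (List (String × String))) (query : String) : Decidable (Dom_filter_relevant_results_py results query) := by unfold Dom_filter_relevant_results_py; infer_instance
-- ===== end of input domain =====

-- B replaces A's filtered tuple list and stable reverse comparison sort by scoring every result once and
-- emitting buckets in a countdown from the maximum score; same return value (alternative decomposition, no speed claim).

-- ===== PORT A =====
def pvBonusKeywords : List String := ["market", "analysis", "startup", "saas", "business", "competitor"]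

-- A's per-result relevance score (title_matches * 2) + snippet_matches + bonus_score
def pvScoreA (query_keywords : List String) (result : List (String × String)) : Int :=
  let title := PySem.Str.lower (PySem.Dict.getD ⟨result⟩ "title" "")
  let snippet := PySem.Str.lower (PySem.Dict.getD ⟨result⟩ "snippet" "")
  let title_matches : Int := query_keywords.foldl (fun n keyword => if PySem.Str.isIn keyword title then n + 1 else n) 0
  let snippet_matches : Int := query_keywords.foldl (fun n keyword => if PySem.Str.isIn keyword snippet then n + 1 else n) 0
  let bonus_score : Int := pvBonusKeywords.foldl (fun n keyword => if PySem.Str.isIn keyword title || PySem.Str.isIn keyword snippet then n + 1 else n) 0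
  title_matches * 2 + snippet_matches + bonus_score

def filter_relevant_results_py (results : List (List (String × String))) (query : String) : List (List (String × String)) :=
  if results = [] then []
  else
    let query_keywords := PySem.Set.ofList (PySem.Str.split₀ (PySem.Str.lower query))
    let scored_results := results.foldl (fun acc result =>
      let relevance_score := pvScoreA query_keywords result
      if 0 < relevance_score then acc ++ [(relevance_score, result)] else acc) []
    (PySem.List.sorted scored_results (fun x => x.1) true).map (fun x => x.2)

-- ===== PORT B =====
-- B's per-result score: list-comprehension lengths, 2*title + snippet + bonus
def pvAltScore (keywords : List String) (result : List (String × String)) : Int :=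
  let title := PySem.Str.lower (PySem.Dict.getD ⟨result⟩ "title" "")
  let snippet := PySem.Str.lower (PySem.Dict.getD ⟨result⟩ "snippet" "")
  2 * ((keywords.filter (fun k => PySem.Str.isIn k title)).length : Int)
    + ((keywords.filter (fun k => PySem.Str.isIn k snippet)).length : Int)
    + ((pvBonusKeywords.filter (fun k => PySem.Str.isIn k title || PySem.Str.isIn k snippet)).length : Int)

-- max((s for s, _ in scored), default=0): Python's left-to-right max, 0 only for the empty list
def pvAltTop : List (Int × List (String × String)) → Int
  | [] => 0
  | (s, _) :: t => t.foldl (fun m p => max m p.1) s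

-- the while-loop: emit the bucket of score n, then n-1, ..., down to 1
def pvAltEmit (scored : List (Int × List (String × String))) : Nat → List (List (String × String))
  | 0 => []
  | n + 1 => (scored.filter (fun p => p.1 == ((n + 1 : Nat) : Int))).map (fun p => p.2) ++ pvAltEmit scored n

def filter_relevant_results_py_alt (results : List (List (String × String))) (query : String) : List (List (String × String)) :=
  let keywords := PySem.Set.ofList (PySem.Str.split₀ (PySem.Str.lower query))
  let scored := results.map (fun r => (pvAltScore keywords r, r))
  pvAltEmit scored (pvAltTop scored).toNat

-- ===== PRECONDITION & SPEC =====
def Spec_filter_relevant_results_py (results : List (List (String × String))) (query : String) (out : List (List (String × String))) : Prop := out = filter_relevant_results_py_alt results query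
instance (results : List (List (String × String))) (query : String) (out : List (List (String × String))) : Decidable (Spec_filter_relevant_results_py results query out) := by unfold Spec_filter_relevant_results_py; infer_instance

-- ===== CLAIM =====
def Claim_equal_filter_relevant_results_py : Prop := ∀ (results : List (List (String × String))) (query : String), Dom_filter_relevant_results_py results query → Spec_filter_relevant_results_py results query (filter_relevant_results_py results query)

-- ===== LEMMAS AND PROOFS =====

-- a counting foldl is the length of the filtered list
theorem pvCount_foldl {α : Type} (P : α → Bool) (l : List α) (n : Int) :
    l.foldl (fun n x => if P x then n + 1 else n) n = n + ((l.filter P).length : Int) := by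
  induction l generalizing n with
  | nil => simp
  | cons x t ih =>
    simp only [List.foldl_cons, List.filter_cons]
    by_cases h : P x
    · rw [if_pos h, if_pos h, ih]
      simp only [List.length_cons]
      push_cast
      ring
    · rw [if_neg h, if_neg h, ih]

theorem pvAltScore_eq (qk : List String) (r : List (String × String)) : pvAltScore qk r = pvScoreA qk r := by
  unfold pvAltScore pvScoreA
  dsimp only
  rw [pvCount_foldl, pvCount_foldl, pvCount_foldl]
  ring

-- A's accumulation is the positive-score filter of the scored map
theorem pvFoldA (qk : List String) (l : List (List (String × String)))
    (a : List (Int × List (String × String))) :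
    l.foldl (fun acc result =>
        let relevance_score := pvScoreA qk result
        if 0 < relevance_score then acc ++ [(relevance_score, result)] else acc) a
      = a ++ (l.map (fun r => (pvScoreA qk r, r))).filter (fun p => decide (0 < p.1)) := by
  induction l generalizing a with
  | nil => simp
  | cons r t ih =>
    simp only [List.foldl_cons, List.map_cons, List.filter_cons]
    by_cases h : 0 < pvScoreA qk r
    · simp [h, ih, List.append_assoc]
    · simp [h, ih]

theorem pvFoldMax_le (l : List (Int × List (String × String))) (s : Int) :
    s ≤ l.foldl (fun m p => max m p.1) s := by
  induction l generalizing s with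
  | nil => simp
  | cons p t ih => exact le_trans (le_max_left s p.1) (ih _)

theorem pvFoldMax_mem (l : List (Int × List (String × String))) (s : Int)
    (p : Int × List (String × String)) (hp : p ∈ l) :
    p.1 ≤ l.foldl (fun m p => max m p.1) s := by
  induction l generalizing s with
  | nil => cases hp
  | cons q t ih =>
    rcases List.mem_cons.mp hp with h | h
    · subst h
      exact le_trans (le_max_right s p.1) (pvFoldMax_le t _)
    · exact ih _ h

theorem pvAltTop_ge (scored : List (Int × List (String × String)))
    (p : Int × List (String × String)) (hp : p ∈ scored) : p.1 ≤ pvAltTop scored := by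
  cases scored with
  | nil => cases hp
  | cons q t =>
    rcases List.mem_cons.mp hp with h | h
    · subst h
      exact pvFoldMax_le t _
    · exact pvFoldMax_mem t _ p h

-- the descending list [n, n-1, ..., 1] as integers
def pvDesc (n : Nat) : List Int := (List.range n).map (fun k : Nat => (n : Int) - (k : Int))

theorem pvDesc_succ (n : Nat) : pvDesc (n + 1) = ((n + 1 : Nat) : Int) :: pvDesc n := by
  unfold pvDesc
  rw [List.range_succ_eq_map, List.map_cons, List.map_map]
  refine congrArg₂ List.cons (by push_cast; ring) ?_
  apply List.map_congr_left
  intro a ha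
  simp only [Function.comp_apply, Nat.succ_eq_add_one]
  push_cast
  ring

theorem pvDesc_mem (n : Nat) (s : Int) (hs : s ∈ pvDesc n) : 1 ≤ s ∧ s ≤ (n : Int) := by
  unfold pvDesc at hs
  simp only [List.mem_map, List.mem_range] at hs
  obtain ⟨k, hk, rfl⟩ := hs
  omega

-- B's countdown loop as a flatMap over the descending score list
theorem pvAltEmit_eq (scored : List (Int × List (String × String))) (n : Nat) :
    pvAltEmit scored n
      = (pvDesc n).flatMap (fun s => (scored.filter (fun p => p.1 == s)).map (fun p => p.2)) := by
  induction n with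
  | zero => simp [pvAltEmit, pvDesc]
  | succ m ih => rw [pvAltEmit, pvDesc_succ, List.flatMap_cons, ih]

-- insertBy passes over a prefix it is never inserted before
theorem pvInsertBy_append {α : Type} (before : α → α → Bool) (x : α) (F S : List α)
    (h : ∀ y ∈ F, before x y = false) :
    PySem.List.insertBy before x (F ++ S) = F ++ PySem.List.insertBy before x S := by
  induction F with
  | nil => simp
  | cons y F ih =>
    simp only [List.cons_append, PySem.List.insertBy]
    rw [h y (by simp)]
    simp [ih (fun z hz => h z (by simp [hz]))]

-- one insertion step of the reverse insertion sort
theorem pvSorted_snoc {α : Type} (key : α → Int) (xs : List α) (x : α) :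
    PySem.List.sorted (xs ++ [x]) key true
      = PySem.List.insertBy (fun a b => decide (key b < key a)) x (PySem.List.sorted xs key true) := by
  rw [PySem.List.sorted_rev_eq_foldl_insertBy, PySem.List.sorted_rev_eq_foldl_insertBy,
    List.foldl_append, List.foldl_cons, List.foldl_nil]

-- stable selection of the maximal-score bucket from a reverse sort
theorem pvSelect {α : Type} (key : α → Int) (M : Int) (xs : List α)
    (hle : ∀ p ∈ xs, key p ≤ M) :
    PySem.List.sorted xs key true
      = xs.filter (fun p => key p == M)
        ++ PySem.List.sorted (xs.filter (fun p => !(key p == M))) key true := by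
  induction xs using List.reverseRecOn with
  | nil => simp [PySem.List.sorted]
  | append_singleton xs x ih =>
    have hxs : ∀ p ∈ xs, key p ≤ M := fun p hp => hle p (by simp [hp])
    have hx : key x ≤ M := hle x (by simp)
    rw [pvSorted_snoc, ih hxs]
    by_cases hk : key x = M
    · rw [pvInsertBy_append _ _ _ _ (by
        intro y hy
        have := List.of_mem_filter hy
        simp only [beq_iff_eq] at this
        simp [this, hk])]
      have hS : PySem.List.insertBy (fun a b => decide (key b < key a)) x
          (PySem.List.sorted (xs.filter (fun p => !(key p == M))) key true)
          = x :: PySem.List.sorted (xs.filter (fun p => !(key p == M))) key true := by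
        cases hcase : PySem.List.sorted (xs.filter (fun p => !(key p == M))) key true with
        | nil => simp [PySem.List.insertBy]
        | cons y t =>
          have hy : y ∈ xs.filter (fun p => !(key p == M)) := by
            rw [← PySem.List.mem_sorted (xs.filter (fun p => !(key p == M))) key true]
            rw [hcase]; simp
          have h1 := List.of_mem_filter hy
          have h2 := hxs y (List.mem_of_mem_filter hy)
          simp only [Bool.not_eq_true', beq_eq_false_iff_ne, ne_eq] at h1
          simp only [PySem.List.insertBy]
          rw [if_pos (decide_eq_true (show key y < key x by omega))]
      rw [hS, List.filter_append, List.filter_append]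
      simp [hk]
    · rw [pvInsertBy_append _ _ _ _ (by
        intro y hy
        have := List.of_mem_filter hy
        simp only [beq_iff_eq] at this
        simp only [decide_eq_false_iff_not, not_lt]
        omega)]
      rw [List.filter_append, List.filter_append, ← pvSorted_snoc]
      simp [hk]

-- the reverse sort is the concatenation of score buckets, highest first
theorem pvBuckets (n : Nat) (xs : List (Int × List (String × String)))
    (h : ∀ p ∈ xs, 1 ≤ p.1 ∧ p.1 ≤ (n : Int)) :
    PySem.List.sorted xs (fun x => x.1) true
      = (pvDesc n).flatMap (fun s => xs.filter (fun p => p.1 == s)) := by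
  induction n generalizing xs with
  | zero =>
    have hnil : xs = [] := by
      cases xs with
      | nil => rfl
      | cons p t => exact absurd (h p (by simp)) (by simp; omega)
    simp [hnil, PySem.List.sorted, pvDesc]
  | succ m ih =>
    rw [pvDesc_succ, List.flatMap_cons]
    rw [pvSelect (fun x => x.1) ((m + 1 : Nat) : Int) xs (fun p hp => by
      have := (h p hp).2; push_cast at *; omega)]
    rw [ih (xs.filter (fun p => !(p.1 == ((m+1 : Nat) : Int)))) (by
      intro p hp
      have h1 := List.of_mem_filter hp
      have h2 := h p (List.mem_of_mem_filter hp)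
      simp only [Bool.not_eq_true', beq_eq_false_iff_ne, ne_eq] at h1
      push_cast at *
      omega)]
    congr 1
    apply List.flatMap_congr
    intro s hs
    have hsm := pvDesc_mem m s hs
    rw [List.filter_filter]
    apply List.filter_congr
    intro p _
    by_cases hp : p.1 = s
    · simp [hp]
      omega
    · simp [hp]

-- a positive bucket of the full scored list is the same bucket of its positive filter
theorem pvBucket_pos (scored : List (Int × List (String × String))) (s : Int) (hs : 1 ≤ s) :
    (scored.filter (fun p => decide (0 < p.1))).filter (fun p => p.1 == s)
      = scored.filter (fun p => p.1 == s) := by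
  rw [List.filter_filter]
  apply List.filter_congr
  intro p _
  by_cases hp : p.1 = s
  · simp [hp]; omega
  · simp [hp]

-- ===== VERDICT =====
theorem filter_relevant_results_py_spec : Claim_equal_filter_relevant_results_py := by
  intro results query _
  unfold Spec_filter_relevant_results_py
  unfold filter_relevant_results_py filter_relevant_results_py_alt
  by_cases hres : results = []
  · simp [hres, pvAltTop, pvAltEmit]
  · simp only [if_neg hres]
    set qk := PySem.Set.ofList (PySem.Str.split₀ (PySem.Str.lower query)) with hqk
    set scored := results.map (fun r => (pvAltScore qk r, r)) with hscored
    have hsA : results.map (fun r => (pvScoreA qk r, r)) = scored := by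
      rw [hscored]; exact List.map_congr_left (fun r _ => by rw [pvAltScore_eq])
    rw [pvFoldA, List.nil_append, hsA]
    set pairs := scored.filter (fun p => decide (0 < p.1)) with hpairs
    set top := pvAltTop scored with htop
    set n := top.toNat with hn
    have hbound : ∀ p ∈ pairs, 1 ≤ p.1 ∧ p.1 ≤ (n : Int) := by
      intro p hp
      have h1 := List.of_mem_filter hp
      simp only [decide_eq_true_eq] at h1
      have h2 := pvAltTop_ge scored p (List.mem_of_mem_filter hp)
      rw [← htop] at h2
      constructor
      · omega
      · have : top ≤ (n : Int) := by rw [hn]; omega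
        omega
    rw [pvBuckets n pairs hbound, List.map_flatMap, pvAltEmit_eq scored n]
    apply List.flatMap_congr
    intro s hs
    rw [← pvBucket_pos scored s (pvDesc_mem n s hs).1, ← hpairs]
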